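-- pv_equiv track=rewrite | github.com/LouisTheLuis/6.009-FA2021 | lab04/untitled1.py | coord_list
-- ===== SOURCE A (Python) =====
-- def coord_list(dimensions):
--     """
--     Returns a list with all the possible coordinates for a N-dimensional array of the given dimensions.
--
--     Parameters:
--         dimensions (tuple): A tuple of N elements (int)s that give the dimensions of the array.
--     """
--     if len(dimensions) == 1:
--         temp_list = []
--         for number in range(dimensions[0]):
--             temp_list.append(number)
--         return temp_list
--
--     else:
--         inner_list = coord_list(dimensions[:-1])
--         temp_list = []
--         for i in range(dimensions[-1]):
--             for j in inner_list:
--                 if type(j) == int: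
--                     value = [j]
--                 else:
--                     value = list(j)
--                 value.append(i)
--                 temp_list.append(value)
--         return temp_list
-- ===== SOURCE B (Python) =====
-- def coord_list(dimensions):
--     """
--     Returns a list with all the possible coordinates for a N-dimensional array of the given dimensions.
--
--     Parameters:
--         dimensions (tuple): A tuple of N elements (int)s that give the dimensions of the array.
--     """
--     if len(dimensions) == 1:
--         return list(range(dimensions[0]))
--     total = 1
--     for d in dimensions:
--         if d <= 0:
--             return []
--         total *= d
--     out = []
--     for k in range(total):
--         coord = []
--         r = k
--         for d in dimensions:
--             coord.append(r % d)
--             r //= d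
--         out.append(coord)
--     return out
-- ===== Notes on version B (the rewrite author's own statement) =====
-- stated objective: alternative
-- what changed: Replaces A's recursion on dimensions[:-1] that rebuilds and copies coordinate lists level by level with a closed-form mixed-radix enumeration: compute total = product of the dimensions (returning [] early if any dimension is nonpositive) and decode each index k in range(total) into its coordinate by repeated divmod.
-- outside the precondition, e.g. on coord_list((3,)): A returns [0, 1, 2], B returns [0, 1, 2]; on coord_list(()): A raises RecursionError, B returns [[]]
import Mathlib
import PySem

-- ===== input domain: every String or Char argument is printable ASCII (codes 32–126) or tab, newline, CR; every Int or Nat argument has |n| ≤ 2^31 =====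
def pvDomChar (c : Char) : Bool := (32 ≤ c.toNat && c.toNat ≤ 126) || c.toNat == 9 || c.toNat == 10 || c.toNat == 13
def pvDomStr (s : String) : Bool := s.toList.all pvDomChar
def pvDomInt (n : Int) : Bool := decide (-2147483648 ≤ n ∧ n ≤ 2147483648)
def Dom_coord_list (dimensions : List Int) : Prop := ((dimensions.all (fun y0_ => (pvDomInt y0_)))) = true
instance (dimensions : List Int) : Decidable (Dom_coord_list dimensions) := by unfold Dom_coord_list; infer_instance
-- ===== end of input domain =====

-- B replaces A's recursion over dimensions[:-1] by a closed-form mixed-radix enumeration: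
-- total = product of the dimensions, and coordinate k is decoded from k by repeated divmod (alternative; same cost).

-- ===== PORT A =====
-- Port of A's recursion.  Python's 1-D base case returns plain ints; the Lean result type
-- List (List Int) forces them to be singleton lists here, which is exactly what the
-- 'type(j) == int: value = [j]' branch of the recursive case makes of them — so in the
-- recursive case 'value' is simply j ++ [i].  Length-0/1 inputs are excluded by Pre_.
def coord_list (dimensions : List Int) : List (List Int) :=
  match dimensions with
  | [] => []  -- Python A recurses forever here (RecursionError); outside Pre_
  | d0 :: rest =>
    if rest.length = 0 then  -- len(dimensions) == 1
      (PySem.List.pyRange 0 d0 1).map (fun n => [n])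
    else
      let inner := coord_list (d0 :: rest).dropLast  -- dimensions[:-1] (dropLast is exact here)
      -- for i in range(dimensions[-1]): for j in inner: temp_list.append(value)
      -- (appends accumulated with cons and one final reverse: Python's O(1) list.append)
      ((PySem.List.pyRange 0 (PySem.List.pyGetD (d0 :: rest) (-1) 0) 1).foldl
        (fun temp i => inner.foldl (fun temp j => (j ++ [i]) :: temp) temp) []).reverse
  termination_by dimensions.length
  decreasing_by simp

-- ===== PORT B =====
-- total = 1; for d in dimensions: if d <= 0: return []; total *= d   (early return = none)
def pvTotal (dims : List Int) (total : Int) : Option Int :=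
  match dims with
  | [] => some total
  | d :: rest => if d ≤ 0 then none else pvTotal rest (total * d)

def coord_list_alt (dimensions : List Int) : List (List Int) :=
  if dimensions.length = 1 then  -- len(dimensions) == 1: plain ints in Python, singletons forced by the type; outside Pre_
    (PySem.List.pyRange 0 (PySem.List.pyGetD dimensions 0 0) 1).map (fun n => [n])
  else
    match pvTotal dimensions 1 with
    | none => []  -- the early 'return []' fired
    | some total =>
      -- for k in range(total): coord = []; r = k; for d: coord.append(r % d); r //= d
      (PySem.List.pyRange 0 total 1).map (fun k =>
        (dimensions.foldl
          (fun (st : List Int × Int) d =>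
            (st.1 ++ [PySem.Int.mod st.2 d], PySem.Int.floordiv st.2 d))
          ([], k)).1)

-- ===== PRECONDITION & SPEC =====
-- Pre_ excludes the empty tuple, on which A raises RecursionError, and the length-1 tuples,
-- on which A returns a list of plain ints — not a value of the declared type List (List Int).
def Pre_coord_list (dimensions : List Int) : Prop := 2 ≤ dimensions.length
instance (dimensions : List Int) : Decidable (Pre_coord_list dimensions) := by unfold Pre_coord_list; infer_instance
def pvWitness_coord_list : List Int := ([2, 3])

def Spec_coord_list (dimensions : List Int) (out : List (List Int)) : Prop := out = coord_list_alt dimensions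
instance (dimensions : List Int) (out : List (List Int)) : Decidable (Spec_coord_list dimensions out) := by unfold Spec_coord_list; infer_instance

-- ===== CLAIM (what is proved, stated in full; the proofs are below) =====
def Claim_equal_coord_list : Prop := ∀ (dimensions : List Int), Dom_coord_list dimensions → Pre_coord_list dimensions → Spec_coord_list dimensions (coord_list dimensions)

-- ===== LEMMAS AND PROOFS =====

-- A's per-dimension step (range(d) outer, prefixes inner), named for the proofs
def pvStep (acc : List (List Int)) (d : Int) : List (List Int) :=
  (PySem.List.pyRange 0 d 1).flatMap (fun i => acc.map (fun p => p ++ [i]))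

-- B's digit decoder, in structural (cons) form
def pvDig (dims : List Int) (k : Int) : List Int :=
  match dims with
  | [] => []
  | d :: rest => PySem.Int.mod k d :: pvDig rest (PySem.Int.floordiv k d)

-- the residue left after decoding all digits
def pvRem (dims : List Int) (k : Int) : Int :=
  dims.foldl (fun r d => PySem.Int.floordiv r d) k

-- B's inner foldl accumulates exactly pvDig
lemma fold_digits (dims : List Int) (acc : List Int) (k : Int) :
    (dims.foldl
      (fun (st : List Int × Int) d =>
        (st.1 ++ [PySem.Int.mod st.2 d], PySem.Int.floordiv st.2 d))
      (acc, k)).1 = acc ++ pvDig dims k := by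
  induction dims generalizing acc k with
  | nil => simp [pvDig]
  | cons d ds ih => simp [pvDig, ih]

-- a cons-accumulating loop is the reversed map ('out.append(f(x))' with a final reverse)
lemma foldl_cons_map {α β : Type} (l : List α) (f : α → β) (acc : List β) :
    l.foldl (fun t x => f x :: t) acc = (l.map f).reverse ++ acc := by
  induction l generalizing acc with
  | nil => simp
  | cons x xs ih => simp [ih]

-- folding reversed blocks onto the accumulator is the reversed flatMap
lemma foldl_revapp {α β : Type} (l : List α) (g : α → List β) (acc : List β) :
    l.foldl (fun t x => (g x).reverse ++ t) acc = (l.flatMap g).reverse ++ acc := by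
  induction l generalizing acc with
  | nil => simp
  | cons x xs ih => simp [ih]

-- A's double loop over range(last) × inner is pvStep applied to inner and last
lemma loop_eq_step (inner : List (List Int)) (last : Int) :
    ((PySem.List.pyRange 0 last 1).foldl
      (fun temp i => inner.foldl (fun temp j => (j ++ [i]) :: temp) temp) []).reverse
    = pvStep inner last := by
  have h1 : (fun (temp : List (List Int)) (i : Int) =>
      inner.foldl (fun temp j => (j ++ [i]) :: temp) temp)
      = (fun temp i => ((fun i => inner.map (fun j => j ++ [i])) i).reverse ++ temp) := by
    funext temp i; exact foldl_cons_map inner _ temp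
  rw [h1, foldl_revapp]
  simp [pvStep, List.flatMap_def]

-- A's backward recursion computes the forward fold of pvStep, on every nonempty input
lemma coord_list_eq_fold (rest : List Int) (d0 : Int) :
    coord_list (d0 :: rest)
      = rest.foldl pvStep ((PySem.List.pyRange 0 d0 1).map (fun j => [j])) := by
  induction rest using List.reverseRecOn with
  | nil => simp [coord_list]
  | append_singleton rs r ih =>
    rw [coord_list]
    have hdrop : (d0 :: (rs ++ [r])).dropLast = d0 :: rs := by
      rw [show d0 :: (rs ++ [r]) = (d0 :: rs) ++ [r] by simp, List.dropLast_concat]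
    have hlast : PySem.List.pyGetD (d0 :: (rs ++ [r])) (-1) 0 = r := by
      rw [show d0 :: (rs ++ [r]) = (d0 :: rs) ++ [r] by simp]
      simp [pysem]
    simp only [List.length_append, List.length_cons, List.foldl_append, List.foldl_cons,
      List.foldl_nil, hdrop, hlast]
    rw [if_neg (by omega), loop_eq_step, ih]

-- a nonpositive dimension empties A's fold …
lemma foldl_step_nil (l : List Int) : l.foldl pvStep [] = [] := by
  induction l with
  | nil => rfl
  | cons d ds ih =>
    rw [List.foldl_cons]
    have h0 : pvStep [] d = [] := by simp [pvStep]
    rw [h0]; exact ih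

lemma foldl_step_eq_nil (l : List Int) (acc : List (List Int))
    (h : ∃ d ∈ l, d ≤ 0) : l.foldl pvStep acc = [] := by
  induction l generalizing acc with
  | nil => simp at h
  | cons d ds ih =>
    by_cases hd : d ≤ 0
    · have : pvStep acc d = [] := by
        simp [pvStep, PySem.List.pyRange_one_eq_nil hd]
      simp [this, foldl_step_nil]
    · obtain ⟨e, he, hle⟩ := h
      rw [List.mem_cons] at he
      rcases he with he | he
      · omega
      · exact ih _ ⟨e, he, hle⟩

-- … and makes B's pvTotal none
lemma pvTotal_none (dims : List Int) (t : Int) (h : ∃ d ∈ dims, d ≤ 0) :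
    pvTotal dims t = none := by
  induction dims generalizing t with
  | nil => simp at h
  | cons d ds ih =>
    by_cases hd : d ≤ 0
    · simp [pvTotal, hd]
    · obtain ⟨e, he, hle⟩ := h
      rw [List.mem_cons] at he
      rcases he with he | he
      · omega
      · simp [pvTotal, hd, ih _ ⟨e, he, hle⟩]

lemma pvTotal_pos (dims : List Int) (t : Int) (h : ∀ d ∈ dims, 0 < d) :
    pvTotal dims t = some (t * dims.prod) := by
  induction dims generalizing t with
  | nil => simp [pvTotal]
  | cons d ds ih =>
    have hd : 0 < d := h d (by simp)
    rw [pvTotal, if_neg (by omega), ih _ (fun e he => h e (by simp [he]))]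
    simp [mul_assoc]

-- shifting k by a multiple of the product leaves the digits, and the residue reads off the multiple
lemma pvShift (dims : List Int) (h : ∀ d ∈ dims, 0 < d) (i s : Int)
    (hs0 : 0 ≤ s) (hs : s < dims.prod) :
    pvDig dims (i * dims.prod + s) = pvDig dims s ∧ pvRem dims (i * dims.prod + s) = i := by
  induction dims generalizing i s with
  | nil =>
    have hs1 : s < 1 := by simpa using hs
    have hs2 : s = 0 := by omega
    subst hs2
    simp [pvDig, pvRem]
  | cons d ds ih =>
    have hd : 0 < d := h d (by simp)
    have hds : ∀ e ∈ ds, 0 < e := fun e he => h e (by simp [he])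
    have hQ : 0 < ds.prod := List.prod_pos hds
    have hprod : (d :: ds).prod = d * ds.prod := by simp
    set Q := ds.prod with hQdef
    have hk : i * (d :: ds).prod + s = (s + (i * Q) * d) := by rw [hprod]; ring
    have hmod : PySem.Int.mod (i * (d :: ds).prod + s) d = PySem.Int.mod s d := by
      rw [hk, PySem.Int.mod_eq_emod_of_pos hd, PySem.Int.mod_eq_emod_of_pos hd]
      exact Int.add_mul_emod_self_right s (i * Q) d
    have hdiv : PySem.Int.floordiv (i * (d :: ds).prod + s) d
        = i * Q + PySem.Int.floordiv s d := by
      rw [hk, PySem.Int.floordiv_eq_ediv_of_pos hd, PySem.Int.floordiv_eq_ediv_of_pos hd,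
        Int.add_mul_ediv_right _ _ (by omega : d ≠ 0)]
      ring
    have hs0' : 0 ≤ PySem.Int.floordiv s d := by
      rw [PySem.Int.floordiv_eq_ediv_of_pos hd]; exact Int.ediv_nonneg hs0 (by omega)
    have hs' : PySem.Int.floordiv s d < Q := by
      rw [PySem.Int.floordiv_eq_ediv_of_pos hd]
      have : s < Q * d := by rw [hprod] at hs; nlinarith [hs]
      exact Int.ediv_lt_of_lt_mul hd (by nlinarith)
    obtain ⟨h1, h2⟩ := ih hds i (PySem.Int.floordiv s d) hs0' hs'
    constructor
    · simp only [pvDig, hmod, hdiv, h1]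
    · simp only [pvRem, List.foldl_cons] at h2 ⊢
      rw [hdiv]; exact h2

-- appending a dimension appends the digit of the residue
lemma pvDig_append (dims : List Int) (r k : Int) :
    pvDig (dims ++ [r]) k = pvDig dims k ++ [PySem.Int.mod (pvRem dims k) r] := by
  induction dims generalizing k with
  | nil => simp [pvDig, pvRem]
  | cons d ds ih => simp [pvDig, pvRem, ih, pvRem]

-- range(0, P*r) split into r blocks of P
lemma rangeSplit (P r : Int) (hP : 0 < P) (hr : 0 ≤ r) :
    PySem.List.pyRange 0 (P * r) 1
      = (PySem.List.pyRange 0 r 1).flatMap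
          (fun i => (PySem.List.pyRange 0 P 1).map (fun s => i * P + s)) := by
  induction r, hr using Int.le_induction with
  | base => simp [PySem.List.pyRange_one_eq_nil]
  | succ r hr ih =>
    have h1 : P * (r + 1) = P * r + P := by ring
    rw [h1, PySem.List.pyRange_one_append 0 (P * r) (P * r + P) (by positivity) (by omega),
      ih, PySem.List.pyRange_one_succ_right hr, List.flatMap_append]
    congr 1
    simp [PySem.List.pyRange_one, mul_comm]

-- one pvStep on the decoded table for dims is the decoded table for dims ++ [r]
lemma step_decode (dims : List Int) (r : Int) (hpos : ∀ d ∈ dims, 0 < d) (hr : 0 < r) :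
    pvStep ((PySem.List.pyRange 0 dims.prod 1).map (pvDig dims)) r
      = (PySem.List.pyRange 0 (dims.prod * r) 1).map (pvDig (dims ++ [r])) := by
  have hP : 0 < dims.prod := List.prod_pos hpos
  rw [pvStep, rangeSplit dims.prod r hP (by omega)]
  rw [List.map_flatMap]
  apply List.flatMap_congr  -- congruence over i ∈ range r (exists? fallback below)
  intro i hi
  rw [PySem.List.mem_pyRange_one] at hi
  rw [List.map_map, List.map_map]
  apply List.map_congr_left
  intro s hs
  rw [PySem.List.mem_pyRange_one] at hs
  obtain ⟨h1, h2⟩ := pvShift dims hpos i s hs.1 hs.2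
  simp only [Function.comp]
  rw [pvDig_append, h1, h2, PySem.Int.mod_eq_emod_of_pos hr, Int.emod_eq_of_lt hi.1 hi.2]

-- A's fold equals B's decoded table when every dimension is positive
lemma foldA_eq (d0 : Int) (rest : List Int) (h : ∀ d ∈ d0 :: rest, 0 < d) :
    rest.foldl pvStep ((PySem.List.pyRange 0 d0 1).map (fun j => [j]))
      = (PySem.List.pyRange 0 ((d0 :: rest).prod) 1).map (pvDig (d0 :: rest)) := by
  induction rest using List.reverseRecOn with
  | nil =>
    simp only [List.foldl_nil, List.prod_cons, List.prod_nil, mul_one]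
    apply List.map_congr_left
    intro k hk
    rw [PySem.List.mem_pyRange_one] at hk
    have hd0 : 0 < d0 := h d0 (by simp)
    simp [pvDig, PySem.Int.mod_eq_emod_of_pos hd0, Int.emod_eq_of_lt hk.1 hk.2]
  | append_singleton rs r ih =>
    have h' : ∀ d ∈ d0 :: rs, 0 < d := by
      intro d hd
      rw [List.mem_cons] at hd
      rcases hd with hd | hd
      · exact h d (by simp [hd])
      · exact h d (by simp [hd])
    have hr : 0 < r := h r (by simp)
    rw [List.foldl_append, List.foldl_cons, List.foldl_nil, ih h', step_decode _ _ h' hr]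
    have hp : (d0 :: (rs ++ [r])).prod = (d0 :: rs).prod * r := by simp [mul_assoc]
    rw [hp]
    simp only [List.cons_append]

-- ===== VERDICT (by name: the statement is the Claim_ definition above) =====
theorem coord_list_spec : Claim_equal_coord_list := by
  intro dimensions _ hpre
  unfold Spec_coord_list
  match dimensions with
  | [] => simp [Pre_coord_list] at hpre
  | d0 :: rest =>
    have hr : rest.length ≠ 0 := by
      simp [Pre_coord_list] at hpre; omega
    have hlen : ¬ (d0 :: rest).length = 1 := by simp only [List.length_cons]; omega
    rw [coord_list_eq_fold, coord_list_alt, if_neg hlen]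
    by_cases hall : ∀ d ∈ d0 :: rest, 0 < d
    · rw [foldA_eq d0 rest hall, pvTotal_pos _ _ hall, one_mul]
      apply List.map_congr_left
      intro k _
      rw [fold_digits]
      simp
    · simp only [not_forall, not_lt] at hall
      obtain ⟨d, hd, hle⟩ := hall
      rw [pvTotal_none _ _ ⟨d, hd, hle⟩]
      rw [List.mem_cons] at hd
      rcases hd with hd | hd
      · have hinit : (PySem.List.pyRange 0 d0 1).map (fun j => ([j] : List Int)) = [] := by
          rw [PySem.List.pyRange_one_eq_nil (by omega)]; rfl
        rw [hinit, foldl_step_nil]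
      · rw [foldl_step_eq_nil rest _ ⟨d, hd, hle⟩]
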